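-- pv_equiv track=rewrite | github.com/extremq/advent | 2023/1/part2/main.py | check_for_digit_spelt
-- ===== SOURCE A (Python) =====
-- def check_for_digit_spelt(string):
--     digit_map = {
--         "zero": 0,
--         "one": 1,
--         "two": 2,
--         "three": 3,
--         "four": 4,
--         "five": 5,
--         "six": 6,
--         "seven": 7,
--         "eight": 8,
--         "nine": 9
--     }
--
--     for digit in digit_map:
--         if string.startswith(digit):
--             return digit_map[digit]
--
--     return None
-- ===== SOURCE B (Python) =====
-- def check_for_digit_spelt(string):
--     # Hand-compiled decision tree: dispatch on the first character, then verify
--     # the unique remaining suffix(es); no table, no scan. Correct because each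
--     # spelled digit is determined by its first letter (t/f/s each start exactly
--     # two words, distinguished by the second slice).
--     c = string[:1]
--     if c == "z":
--         return 0 if string[1:4] == "ero" else None
--     if c == "o":
--         return 1 if string[1:3] == "ne" else None
--     if c == "t":
--         if string[1:3] == "wo":
--             return 2
--         return 3 if string[1:5] == "hree" else None
--     if c == "f":
--         if string[1:4] == "our":
--             return 4
--         return 5 if string[1:4] == "ive" else None
--     if c == "s":
--         if string[1:3] == "ix":
--             return 6
--         return 7 if string[1:5] == "even" else None
--     if c == "e":
--         return 8 if string[1:5] == "ight" else None
--     if c == "n":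
--         return 9 if string[1:4] == "ine" else None
--     return None
-- ===== Notes on version B (the rewrite author's own statement) =====
-- stated objective: alternative
-- what changed: B replaces A's scan of a ten-entry word->digit dict with per-word startswith tests by a hand-compiled decision tree: it dispatches on the first character and then verifies the one (or, for t/f/s, two) possible suffix slices, with no dict and no loop.
import Mathlib
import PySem

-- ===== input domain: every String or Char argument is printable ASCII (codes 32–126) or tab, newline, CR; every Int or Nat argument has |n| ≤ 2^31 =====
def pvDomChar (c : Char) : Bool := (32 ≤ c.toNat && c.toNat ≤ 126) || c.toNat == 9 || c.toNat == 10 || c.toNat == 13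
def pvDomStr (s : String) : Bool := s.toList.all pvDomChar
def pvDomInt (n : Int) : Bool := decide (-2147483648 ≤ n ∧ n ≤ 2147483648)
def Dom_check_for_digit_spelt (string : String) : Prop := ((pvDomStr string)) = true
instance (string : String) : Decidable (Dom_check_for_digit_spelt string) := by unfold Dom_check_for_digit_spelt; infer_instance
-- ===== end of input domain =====

-- B is a hand-compiled decision tree (dispatch on the first character, then verify the suffix slice)
-- instead of A's loop over a ten-entry dict with startswith tests; same result (alternative, no speed claim).

-- ===== PORT A =====
def pyDigitMapA : PySem.Dict String Int := PySem.Dict.ofList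
  [("zero", 0), ("one", 1), ("two", 2), ("three", 3), ("four", 4),
   ("five", 5), ("six", 6), ("seven", 7), ("eight", 8), ("nine", 9)]

-- 'for digit in digit_map: if string.startswith(digit): return digit_map[digit]'
def checkLoopA : List String → String → Option Int
  | [], _ => none
  | d :: rest, s =>
      if PySem.Str.startswith s d then some (pyDigitMapA.getD d 0)
      else checkLoopA rest s

def check_for_digit_spelt (string : String) : Option Int :=
  checkLoopA pyDigitMapA.keys string

-- ===== PORT B =====
-- 'c = string[:1]; if c == "z": return 0 if string[1:4] == "ero" else None; …'
def check_for_digit_spelt_alt (string : String) : Option Int :=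
  let c := PySem.Str.slice string none (some 1)
  if c == "z" then (if PySem.Str.slice string (some 1) (some 4) == "ero" then some 0 else none)
  else if c == "o" then (if PySem.Str.slice string (some 1) (some 3) == "ne" then some 1 else none)
  else if c == "t" then
    (if PySem.Str.slice string (some 1) (some 3) == "wo" then some 2
     else if PySem.Str.slice string (some 1) (some 5) == "hree" then some 3 else none)
  else if c == "f" then
    (if PySem.Str.slice string (some 1) (some 4) == "our" then some 4
     else if PySem.Str.slice string (some 1) (some 4) == "ive" then some 5 else none)
  else if c == "s" then
    (if PySem.Str.slice string (some 1) (some 3) == "ix" then some 6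
     else if PySem.Str.slice string (some 1) (some 5) == "even" then some 7 else none)
  else if c == "e" then (if PySem.Str.slice string (some 1) (some 5) == "ight" then some 8 else none)
  else if c == "n" then (if PySem.Str.slice string (some 1) (some 4) == "ine" then some 9 else none)
  else none

-- ===== PRECONDITION & SPEC =====
def Spec_check_for_digit_spelt (string : String) (out : Option Int) : Prop := out = check_for_digit_spelt_alt string
instance (string : String) (out : Option Int) : Decidable (Spec_check_for_digit_spelt string out) := by unfold Spec_check_for_digit_spelt; infer_instance

-- ===== CLAIM (what is proved, stated in full; the proofs are below) =====
def Claim_equal_check_for_digit_spelt : Prop := ∀ (string : String), Dom_check_for_digit_spelt string → Spec_check_for_digit_spelt string (check_for_digit_spelt string)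

-- ===== LEMMAS AND PROOFS =====

lemma beq_str_iff_toList (a b : String) : (a == b) = (a.toList == b.toList) := by
  rcases h : a.toList == b.toList with _ | _
  · rw [beq_eq_false_iff_ne] at h
    rw [beq_eq_false_iff_ne]
    intro hc; exact h (by rw [hc])
  · rw [beq_iff_eq] at h
    rw [beq_iff_eq]
    exact String.toList_injective h

lemma pyDigitMapA_eq : pyDigitMapA = PySem.Dict.mk
  [("zero", 0), ("one", 1), ("two", 2), ("three", 3), ("four", 4),
   ("five", 5), ("six", 6), ("seven", 7), ("eight", 8), ("nine", 9)] := by decide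

lemma tl0 : ("zero" : String).toList = ['z','e','r','o'] := by decide
lemma tl1 : ("one" : String).toList = ['o','n','e'] := by decide
lemma tl2 : ("two" : String).toList = ['t','w','o'] := by decide
lemma tl3 : ("three" : String).toList = ['t','h','r','e','e'] := by decide
lemma tl4 : ("four" : String).toList = ['f','o','u','r'] := by decide
lemma tl5 : ("five" : String).toList = ['f','i','v','e'] := by decide
lemma tl6 : ("six" : String).toList = ['s','i','x'] := by decide
lemma tl7 : ("seven" : String).toList = ['s','e','v','e','n'] := by decide
lemma tl8 : ("eight" : String).toList = ['e','i','g','h','t'] := by decide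
lemma tl9 : ("nine" : String).toList = ['n','i','n','e'] := by decide


lemma sl0 : ("z" : String).toList = ['z'] := by decide
lemma sl1 : ("o" : String).toList = ['o'] := by decide
lemma sl2 : ("t" : String).toList = ['t'] := by decide
lemma sl3 : ("f" : String).toList = ['f'] := by decide
lemma sl4 : ("s" : String).toList = ['s'] := by decide
lemma sl5 : ("e" : String).toList = ['e'] := by decide
lemma sl6 : ("n" : String).toList = ['n'] := by decide
lemma sl7 : ("ero" : String).toList = ['e','r','o'] := by decide
lemma sl8 : ("ne" : String).toList = ['n','e'] := by decide
lemma sl9 : ("wo" : String).toList = ['w','o'] := by decide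
lemma sl10 : ("hree" : String).toList = ['h','r','e','e'] := by decide
lemma sl11 : ("our" : String).toList = ['o','u','r'] := by decide
lemma sl12 : ("ive" : String).toList = ['i','v','e'] := by decide
lemma sl13 : ("ix" : String).toList = ['i','x'] := by decide
lemma sl14 : ("even" : String).toList = ['e','v','e','n'] := by decide
lemma sl15 : ("ight" : String).toList = ['i','g','h','t'] := by decide
lemma sl16 : ("ine" : String).toList = ['i','n','e'] := by decide

-- Both sides only depend on the first five characters: reduce to s.toList, exhaust the
-- (at most five) leading characters, and case on which dispatch letter the first one is.
set_option maxHeartbeats 1000000 in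
lemma loops_agree (s : String) : check_for_digit_spelt s = check_for_digit_spelt_alt s := by
  simp only [check_for_digit_spelt, check_for_digit_spelt_alt]
  simp [checkLoopA, pyDigitMapA_eq, PySem.Dict.keys_mk, PySem.Dict.getD,
    PySem.Dict.get?_mk_cons, beq_str_iff_toList,
    PySem.Str.startswith_eq, PySem.Chars.startswith, pysem,
    sl0, sl1, sl2, sl3, sl4, sl5, sl6, sl7, sl8, sl9, sl10, sl11, sl12, sl13, sl14, sl15, sl16,
    tl0, tl1, tl2, tl3, tl4, tl5, tl6, tl7, tl8, tl9]
  generalize s.toList = cs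
  rcases cs with _|⟨a,_|⟨b,_|⟨c,_|⟨d,_|⟨e,rest⟩⟩⟩⟩⟩ <;> simp <;>
    (rcases Decidable.em (a='z') with hz|hz <;> rcases Decidable.em (a='o') with ho|ho <;>
     rcases Decidable.em (a='t') with ht|ht <;> rcases Decidable.em (a='f') with hf|hf <;>
     rcases Decidable.em (a='s') with hs|hs <;> rcases Decidable.em (a='e') with he|he <;>
     rcases Decidable.em (a='n') with hn|hn <;>
     simp_all [eq_comm])

-- ===== VERDICT (by name: the statement is the Claim_ definition above) =====
theorem check_for_digit_spelt_spec : Claim_equal_check_for_digit_spelt := by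
  intro s _
  unfold Spec_check_for_digit_spelt
  exact loops_agree s
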